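-- pv_equiv track=rewrite | github.com/Grumbel/rfactortools | rfactortools/gsc2013.py | _find_track_directory_from_searchpath
-- ===== SOURCE A (Python) =====
-- def prefix_split(lhs, rhs):
--     length = min(len(lhs), len(rhs))
--     for i in range(0, length):
--         if lhs[i].lower() != rhs[i].lower():
--             return lhs[0:i], lhs[i:], rhs[i:]
--     return lhs[0:length], lhs[length:], rhs[length:]
--
-- def find_sublist(haystack, needle):
--     for i in range(0, len(haystack) - len(needle) + 1):
--         if haystack[i:i+len(needle)] == needle:
--             return i
--     return None
--
-- def _find_track_directory_from_searchpath(directory, search_path, depth=0):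
--     result = find_sublist(directory, search_path)
--     if result is not None:
--         return (directory[result + len(search_path) - 1:],
--                 None)
--     else:
--         # assume that the ``SearchPath`` contains elements not found
--         # in ``directory ``, i.e. 70tracks is missing from the mod
--         prefix, lhs, rhs = prefix_split(search_path, directory)
--
--         if prefix:
--             if lhs:
--                 rest = lhs
--             else:
--                 rest = None
--             return (([prefix[-1]] + rhs), rest)
--         elif depth < 3 and len(directory) > 1:
--             # SearchPath doesn't go to the track directory, so cut track directory one short and try again
--             return _find_track_directory_from_searchpath(directory[1:], search_path, depth+1)
--         else:
--             raise Exception("no common prefix for track: director: %s SearchPath: %s" % (directory, search_path))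
-- ===== SOURCE B (Python) =====
-- def _is_prefix(prefix, xs):
--     return len(prefix) <= len(xs) and all(a == b for a, b in zip(prefix, xs))
--
--
-- def _find_index(hay, needle):
--     i = 0
--     while True:
--         if _is_prefix(needle, hay):
--             return i
--         if not hay:
--             return None
--         hay = hay[1:]
--         i += 1
--
--
-- def _common_prefix_len(lhs, rhs):
--     p = 0
--     for a, b in zip(lhs, rhs):
--         if a.lower() != b.lower():
--             break
--         p += 1
--     return p
--
--
-- def _find_track_directory_from_searchpath(directory, search_path, depth=0):
--     d = list(directory)
--     while True:
--         i = _find_index(d, search_path)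
--         if i is not None:
--             return (d[i + len(search_path) - 1:], None)
--         p = _common_prefix_len(search_path, d)
--         if p:
--             rest = search_path[p:] or None
--             return ([search_path[p - 1]] + d[p:], rest)
--         if depth < 3 and len(d) > 1:
--             d = d[1:]
--             depth += 1
--         else:
--             raise Exception("no common prefix for track: director: %s SearchPath: %s" % (d, search_path))
-- ===== Notes on version B (the rewrite author's own statement) =====
-- stated objective: alternative
-- what changed: Replaces A's slice-comparing index loop for sublist search by a structural prefix-testing scan over suffixes, the indexed early-return prefix_split loop by a zip-based common-prefix count, and the recursive depth-limited descent by an iterative while-loop.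
import Mathlib
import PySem

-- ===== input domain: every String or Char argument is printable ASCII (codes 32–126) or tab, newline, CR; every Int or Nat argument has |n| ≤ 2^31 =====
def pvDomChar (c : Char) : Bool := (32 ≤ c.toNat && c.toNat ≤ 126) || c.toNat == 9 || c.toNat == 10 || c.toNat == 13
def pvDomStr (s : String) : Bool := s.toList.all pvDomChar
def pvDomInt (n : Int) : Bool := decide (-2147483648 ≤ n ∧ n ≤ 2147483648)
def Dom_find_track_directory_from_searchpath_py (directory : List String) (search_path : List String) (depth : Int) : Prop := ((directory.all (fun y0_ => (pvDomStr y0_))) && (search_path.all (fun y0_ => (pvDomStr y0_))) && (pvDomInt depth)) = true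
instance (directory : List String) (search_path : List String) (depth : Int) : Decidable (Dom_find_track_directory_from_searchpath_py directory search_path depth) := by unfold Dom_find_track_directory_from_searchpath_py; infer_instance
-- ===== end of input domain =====

-- B replaces A's recursive descent + slice-comparing sublist scan by an iterative outer loop,
-- a structural prefix-testing search and a zip-based common-prefix count (objective: alternative;
-- return-value equivalence on all inputs where the Python A returns, i.e. does not raise).

-- ===== PORT A =====

-- find_sublist's loop: i over range(0, len(haystack) - len(needle) + 1), comparing the slice
def py_find_sublist_go (h n : List String) (i : Nat) : Option Int :=
  if hc : (i : Int) < (h.length : Int) - (n.length : Int) + 1 then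
    if PySem.List.slice h (some (i : Int)) (some ((i : Int) + (n.length : Int))) = n then
      some (i : Int)
    else py_find_sublist_go h n (i + 1)
  else none
termination_by h.length + 1 - i
decreasing_by omega

def py_find_sublist (haystack needle : List String) : Option Int :=
  py_find_sublist_go haystack needle 0

-- prefix_split's loop: i over range(0, length); lhs[i]/rhs[i] are in range there (i < length ≤ both lengths), so pyGetD is exact
def py_prefix_split_go (lhs rhs : List String) (length i : Nat) :
    List String × List String × List String :=
  if hc : i < length then
    if PySem.Str.lower (PySem.List.pyGetD lhs (i : Int) "") ≠
       PySem.Str.lower (PySem.List.pyGetD rhs (i : Int) "") then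
      (PySem.List.slice lhs (some 0) (some (i : Int)),
       PySem.List.slice lhs (some (i : Int)) none,
       PySem.List.slice rhs (some (i : Int)) none)
    else py_prefix_split_go lhs rhs length (i + 1)
  else
    (PySem.List.slice lhs (some 0) (some (length : Int)),
     PySem.List.slice lhs (some (length : Int)) none,
     PySem.List.slice rhs (some (length : Int)) none)
termination_by length - i
decreasing_by omega

def py_prefix_split (lhs rhs : List String) : List String × List String × List String :=
  py_prefix_split_go lhs rhs (min lhs.length rhs.length) 0

-- main function; where Python raises the Exception (excluded by Pre_) the port returns ([], none).
-- prefix[-1] is in range in its branch (prefix ≠ []), so pyGetD is exact there.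
def find_track_directory_from_searchpath_py (directory : List String) (search_path : List String) (depth : Int) : List String × Option (List String) :=
  match py_find_sublist directory search_path with
  | some result =>
      (PySem.List.slice directory (some (result + (search_path.length : Int) - 1)) none, none)
  | none =>
      let t := py_prefix_split search_path directory
      if t.1 ≠ [] then
        (PySem.List.pyGetD t.1 (-1) "" :: t.2.2,
         if t.2.1 ≠ [] then some t.2.1 else none)
      else if hg : depth < 3 ∧ directory.length > 1 then
        find_track_directory_from_searchpath_py (PySem.List.slice directory (some 1) none) search_path (depth + 1)
      else ([], none)
termination_by directory.length
decreasing_by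
  rw [PySem.List.slice_from_one]
  simp only [List.length_tail]
  omega

-- ===== PORT B =====

-- _is_prefix(prefix, xs)
def alt_is_prefix (p xs : List String) : Bool :=
  decide (p.length ≤ xs.length) && (p.zip xs).all (fun ab => ab.1 == ab.2)

-- _find_index's while-loop (hay shrinks by one, i counts up)
def alt_find_index_go (hay needle : List String) (i : Nat) : Option Nat :=
  if alt_is_prefix needle hay then some i
  else
    match hay with
    | [] => none
    | _ :: t => alt_find_index_go t needle (i + 1)

-- _common_prefix_len: length of the matching prefix of zip(lhs, rhs)
def alt_common_prefix_len (lhs rhs : List String) : Nat :=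
  ((lhs.zip rhs).takeWhile (fun ab => PySem.Str.lower ab.1 == PySem.Str.lower ab.2)).length

-- main while-loop; where Python B raises (excluded by Pre_) the port returns ([], some [])
-- (a sentinel distinct from port A's, so the equivalence genuinely needs Pre_).
def find_track_directory_from_searchpath_py_alt (directory : List String) (search_path : List String) (depth : Int) : List String × Option (List String) :=
  match alt_find_index_go directory search_path 0 with
  | some i =>
      (PySem.List.slice directory (some ((i : Int) + (search_path.length : Int) - 1)) none, none)
  | none =>
      let p := alt_common_prefix_len search_path directory
      if p ≠ 0 then
        (search_path.getD (p - 1) "" :: directory.drop p,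
         if search_path.drop p ≠ [] then some (search_path.drop p) else none)
      else if hg : depth < 3 ∧ directory.length > 1 then
        find_track_directory_from_searchpath_py_alt (directory.drop 1) search_path (depth + 1)
      else ([], some [])
termination_by directory.length
decreasing_by simp only [List.length_drop]; omega

-- ===== PRECONDITION & SPEC =====

-- one step of the descent can succeed: search_path occurs in d, or they share a (case-insensitive) first component
def pvSucc (search_path d : List String) : Bool :=
  decide (search_path <:+: d) ||
    (decide (search_path ≠ []) && decide (d ≠ []) &&
      (PySem.Str.lower (search_path.headD "") == PySem.Str.lower (d.headD "")))

-- Pre_ excludes exactly the inputs on which Python A raises its Exception: none of the at most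
-- min(3 - depth, len(directory) - 1) + 1 suffixes of directory that A visits matches search_path
-- as a sublist or shares a case-insensitive first component with it.
def Pre_find_track_directory_from_searchpath_py (directory : List String) (search_path : List String) (depth : Int) : Prop :=
  ∃ k ∈ List.range (min (3 - depth).toNat (directory.length - 1) + 1),
    pvSucc search_path (directory.drop k) = true
instance (directory : List String) (search_path : List String) (depth : Int) : Decidable (Pre_find_track_directory_from_searchpath_py directory search_path depth) := by unfold Pre_find_track_directory_from_searchpath_py; infer_instance

def pvWitness_find_track_directory_from_searchpath_py : List String × List String × Int :=
  (["games", "tracks", "monza"], ["tracks", "monza"], 0)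

def Spec_find_track_directory_from_searchpath_py (directory : List String) (search_path : List String) (depth : Int) (out : List String × Option (List String)) : Prop := out = find_track_directory_from_searchpath_py_alt directory search_path depth
instance (directory : List String) (search_path : List String) (depth : Int) (out : List String × Option (List String)) : Decidable (Spec_find_track_directory_from_searchpath_py directory search_path depth out) := by unfold Spec_find_track_directory_from_searchpath_py; infer_instance

-- ===== CLAIM (what is proved, stated in full; the proofs are below) =====
def Claim_equal_find_track_directory_from_searchpath_py : Prop := ∀ (directory : List String) (search_path : List String) (depth : Int), Dom_find_track_directory_from_searchpath_py directory search_path depth → Pre_find_track_directory_from_searchpath_py directory search_path depth → Spec_find_track_directory_from_searchpath_py directory search_path depth (find_track_directory_from_searchpath_py directory search_path depth)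

-- ===== LEMMAS AND PROOFS =====

lemma alt_is_prefix_iff (p : List String) : ∀ xs, alt_is_prefix p xs = true ↔ p <+: xs := by
  induction p with
  | nil => intro xs; simp [alt_is_prefix]
  | cons a p ih =>
    intro xs
    cases xs with
    | nil => simp [alt_is_prefix]
    | cons b xs =>
      rw [List.cons_prefix_cons, ← ih xs]
      simp only [alt_is_prefix, List.zip_cons_cons, List.all_cons, List.length_cons,
        Bool.and_eq_true, decide_eq_true_eq, beq_iff_eq, Nat.add_le_add_iff_right]
      tauto

lemma alt_is_prefix_false_of_long {p xs : List String} (h : xs.length < p.length) :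
    ¬ alt_is_prefix p xs = true := by
  simp only [alt_is_prefix, Bool.and_eq_true, decide_eq_true_eq, not_and]
  intro hle
  exact absurd hle (by omega)

lemma alt_find_none_of_short (n : List String) :
    ∀ (hay : List String) (i : Nat), hay.length < n.length → alt_find_index_go hay n i = none := by
  intro hay
  induction hay with
  | nil =>
    intro i hlen
    rw [alt_find_index_go.eq_def, if_neg (alt_is_prefix_false_of_long hlen)]
  | cons c t ih =>
    intro i hlen
    rw [alt_find_index_go.eq_def, if_neg (alt_is_prefix_false_of_long hlen)]
    exact ih (i + 1) (by simp only [List.length_cons] at hlen; omega)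

lemma find_go_last (h n : List String) (i : Nat) (hi : i = h.length) :
    py_find_sublist_go h n i = (alt_find_index_go (h.drop i) n i).map (fun k => (k : Int)) := by
  have hd : h.drop i = [] := by rw [hi, List.drop_length]
  rw [py_find_sublist_go, hd]
  by_cases hn : n = []
  · subst hn
    rw [dif_pos (by simp; omega)]
    rw [if_pos (by simp [PySem.List.slice_natCast])]
    rw [alt_find_index_go.eq_def, if_pos (by simp [alt_is_prefix])]
    rfl
  · have hn0 : 0 < n.length := List.length_pos_of_ne_nil hn
    rw [dif_neg (by omega)]
    rw [alt_find_index_go.eq_def, if_neg (alt_is_prefix_false_of_long (by simp; omega))]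
    rfl

lemma find_go_eq (h n : List String) :
    ∀ (j i : Nat), h.length ≤ i + j → i ≤ h.length →
      py_find_sublist_go h n i = (alt_find_index_go (h.drop i) n i).map (fun k => (k : Int)) := by
  intro j
  induction j with
  | zero => intro i h1 h2; exact find_go_last h n i (by omega)
  | succ j ih =>
    intro i h1 h2
    rcases Nat.lt_or_ge i h.length with hi | hi
    · have hslen : (h.drop i).length = h.length - i := by simp
      have htail : h.drop (i + 1) = (h.drop i).tail := by rw [List.tail_drop]
      by_cases hp : alt_is_prefix n (h.drop i) = true
      · have hpre : n <+: h.drop i := (alt_is_prefix_iff n _).mp hp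
        have hlen : n.length ≤ (h.drop i).length := hpre.length_le
        have htake : (h.drop i).take n.length = n := (List.prefix_iff_eq_take.mp hpre).symm
        rw [py_find_sublist_go, dif_pos (by omega)]
        rw [if_pos (by rw [PySem.List.slice_natCast_add]; exact htake)]
        rw [alt_find_index_go.eq_def, if_pos hp]
        rfl
      · by_cases hc : (i : Int) < (h.length : Int) - (n.length : Int) + 1
        · rw [py_find_sublist_go, dif_pos hc, if_neg ?slice_ne]
          case slice_ne =>
            rw [PySem.List.slice_natCast_add]
            intro heq
            exact hp ((alt_is_prefix_iff n _).mpr (List.prefix_iff_eq_take.mpr heq.symm))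
          rw [ih (i + 1) (by omega) (by omega)]
          rcases hd : h.drop i with _ | ⟨c, t⟩
          · rw [hd] at hslen; simp at hslen; omega
          · rw [hd] at hp
            have ht' : h.drop (i + 1) = t := by rw [htail, hd]; rfl
            rw [ht']
            conv_rhs => rw [alt_find_index_go.eq_def]
            rw [if_neg hp]
        · rw [py_find_sublist_go, dif_neg hc]
          have hshort : (h.drop i).length < n.length := by omega
          rw [alt_find_none_of_short n _ i hshort]
          rfl
    · exact find_go_last h n i (by omega)

lemma cp_cons (a b : String) (l r : List String) :
    alt_common_prefix_len (a :: l) (b :: r) =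
      if PySem.Str.lower a = PySem.Str.lower b then alt_common_prefix_len l r + 1 else 0 := by
  by_cases h : PySem.Str.lower a = PySem.Str.lower b <;>
    simp [alt_common_prefix_len, h]

lemma cp_le (l : List String) : ∀ r, alt_common_prefix_len l r ≤ min l.length r.length := by
  induction l with
  | nil => intro r; simp [alt_common_prefix_len]
  | cons a l ih =>
    intro r
    cases r with
    | nil => simp [alt_common_prefix_len]
    | cons b r =>
      rw [cp_cons]
      split_ifs with h
      · have := ih r; simp; omega
      · simp

lemma cp_get (l : List String) :
    ∀ r j, j < alt_common_prefix_len l r →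
      PySem.Str.lower (l.getD j "") = PySem.Str.lower (r.getD j "") := by
  induction l with
  | nil => intro r j hj; simp [alt_common_prefix_len] at hj
  | cons a l ih =>
    intro r j hj
    cases r with
    | nil => simp [alt_common_prefix_len] at hj
    | cons b r =>
      rw [cp_cons] at hj
      split_ifs at hj with h
      · cases j with
        | zero => simpa using h
        | succ j => simpa using ih r j (by omega)
      · omega

lemma cp_ne (l : List String) :
    ∀ r, alt_common_prefix_len l r < min l.length r.length →
      PySem.Str.lower (l.getD (alt_common_prefix_len l r) "") ≠
        PySem.Str.lower (r.getD (alt_common_prefix_len l r) "") := by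
  induction l with
  | nil => intro r h; simp at h
  | cons a l ih =>
    intro r h
    cases r with
    | nil => simp at h
    | cons b r =>
      rw [cp_cons] at h ⊢
      split_ifs at h ⊢ with hab
      · simpa using ih r (by simp at h; omega)
      · simpa using hab

lemma split_go_last (l r : List String) (i : Nat)
    (hi : min l.length r.length ≤ i) (hc : i ≤ alt_common_prefix_len l r) :
    py_prefix_split_go l r (min l.length r.length) i =
      (l.take (alt_common_prefix_len l r), l.drop (alt_common_prefix_len l r),
        r.drop (alt_common_prefix_len l r)) := by
  have hle := cp_le l r
  have hci : alt_common_prefix_len l r = min l.length r.length := by omega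
  rw [py_prefix_split_go, dif_neg (by omega), hci]
  simp only [PySem.List.slice_zero_start, PySem.List.slice_to_natCast,
    PySem.List.slice_from_natCast]

lemma split_go_eq (l r : List String) :
    ∀ (j i : Nat), min l.length r.length ≤ i + j → i ≤ alt_common_prefix_len l r →
      py_prefix_split_go l r (min l.length r.length) i =
        (l.take (alt_common_prefix_len l r), l.drop (alt_common_prefix_len l r),
          r.drop (alt_common_prefix_len l r)) := by
  intro j
  induction j with
  | zero => intro i h1 h2; exact split_go_last l r i (by omega) h2
  | succ j ih =>
    intro i h1 h2
    rcases Nat.lt_or_ge i (min l.length r.length) with hi | hi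
    · rw [py_prefix_split_go, dif_pos hi]
      simp only [PySem.List.pyGetD_natCast]
      by_cases heq : PySem.Str.lower (l.getD i "") = PySem.Str.lower (r.getD i "")
      · rw [if_neg (by simpa using heq)]
        have hne : i ≠ alt_common_prefix_len l r := by
          intro hcontra
          exact cp_ne l r (by omega) (by rw [← hcontra]; exact heq)
        exact ih (i + 1) (by omega) (by omega)
      · have hge : alt_common_prefix_len l r ≤ i := by
          by_contra hlt
          exact heq (cp_get l r i (by omega))
        have hci : i = alt_common_prefix_len l r := by omega
        rw [if_pos (by simpa using heq)]
        simp only [PySem.List.slice_zero_start, PySem.List.slice_to_natCast,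
          PySem.List.slice_from_natCast]
        rw [hci]
    · exact split_go_last l r i hi h2

lemma py_prefix_split_eq (l r : List String) :
    py_prefix_split l r =
      (l.take (alt_common_prefix_len l r), l.drop (alt_common_prefix_len l r),
        r.drop (alt_common_prefix_len l r)) :=
  split_go_eq l r (min l.length r.length) 0 (by omega) (by omega)

lemma alt_find_none_iff (n : List String) :
    ∀ (h : List String) (i : Nat), alt_find_index_go h n i = none ↔ ¬ n <:+: h := by
  intro h
  induction h with
  | nil =>
    intro i
    rw [alt_find_index_go.eq_def]
    by_cases hn : n = []
    · subst hn
      rw [if_pos (by simp [alt_is_prefix])]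
      simp
    · have hn0 : 0 < n.length := List.length_pos_of_ne_nil hn
      rw [if_neg (alt_is_prefix_false_of_long (by simpa using hn0))]
      simp [List.infix_nil, hn]
  | cons c t ih =>
    intro i
    rw [alt_find_index_go.eq_def]
    by_cases hp : alt_is_prefix n (c :: t) = true
    · rw [if_pos hp]
      have := (alt_is_prefix_iff n _).mp hp
      simp [this.isInfix]
    · rw [if_neg hp]
      show alt_find_index_go t n (i + 1) = none ↔ _
      rw [ih (i + 1), List.infix_cons_iff]
      have hnp : ¬ n <+: c :: t := fun hpre => hp ((alt_is_prefix_iff n _).mpr hpre)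
      tauto

lemma cp_pos_iff (sp d : List String) :
    0 < alt_common_prefix_len sp d ↔
      (sp ≠ [] ∧ d ≠ [] ∧ PySem.Str.lower (sp.headD "") = PySem.Str.lower (d.headD "")) := by
  cases sp with
  | nil => simp [alt_common_prefix_len]
  | cons a l =>
    cases d with
    | nil => simp [alt_common_prefix_len]
    | cons b r =>
      rw [cp_cons]
      split_ifs with h <;> simp [h]

-- Pre_ propagates through one step of the descent, and forces the recursion guard
lemma pre_step (d sp : List String) (dep : Int)
    (hpre : Pre_find_track_directory_from_searchpath_py d sp dep)
    (hfind : alt_find_index_go d sp 0 = none)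
    (hcp : alt_common_prefix_len sp d = 0) :
    (dep < 3 ∧ 1 < d.length) ∧
      Pre_find_track_directory_from_searchpath_py (d.drop 1) sp (dep + 1) := by
  obtain ⟨k, hkmem, hk⟩ := hpre
  rw [List.mem_range] at hkmem
  have hk0 : k ≠ 0 := by
    rintro rfl
    rw [List.drop_zero] at hk
    rw [pvSucc, Bool.or_eq_true] at hk
    rcases hk with hinf | hhead
    · exact (alt_find_none_iff sp d 0).mp hfind (by simpa using hinf)
    · simp only [Bool.and_eq_true, decide_eq_true_eq, beq_iff_eq] at hhead
      have := (cp_pos_iff sp d).mpr ⟨hhead.1.1, hhead.1.2, hhead.2⟩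
      omega
  have hguard : dep < 3 ∧ 1 < d.length := by
    constructor <;> omega
  refine ⟨hguard, ⟨k - 1, ?_, ?_⟩⟩
  · rw [List.mem_range]
    simp only [List.length_drop]
    omega
  · rw [List.drop_drop]
    have h1k : 1 + (k - 1) = k := by omega
    rw [h1k]
    exact hk

lemma main_step (d sp : List String) (dep : Int)
    (ih : ∀ (d' : List String) (dep' : Int), d'.length < d.length →
      Pre_find_track_directory_from_searchpath_py d' sp dep' →
      find_track_directory_from_searchpath_py d' sp dep' =
        find_track_directory_from_searchpath_py_alt d' sp dep')
    (hpre : Pre_find_track_directory_from_searchpath_py d sp dep) :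
    find_track_directory_from_searchpath_py d sp dep =
      find_track_directory_from_searchpath_py_alt d sp dep := by
  have hfind : py_find_sublist d sp = (alt_find_index_go d sp 0).map (fun k => (k : Int)) := by
    have := find_go_eq d sp d.length 0 (by omega) (by omega)
    rw [List.drop_zero] at this
    exact this
  rw [find_track_directory_from_searchpath_py, find_track_directory_from_searchpath_py_alt]
  rcases hB : alt_find_index_go d sp 0 with _ | k
  · have hA : py_find_sublist d sp = none := by rw [hfind, hB]; rfl
    simp only [hA]
    rw [py_prefix_split_eq]
    set c := alt_common_prefix_len sp d with hcdef
    by_cases hc : c = 0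
    · have htake : sp.take c = [] := by rw [hc]; exact List.take_zero
      rw [if_neg (by simp [htake]), if_neg (by simp [hc])]
      obtain ⟨hguard, hpre'⟩ := pre_step d sp dep hpre hB hc
      rw [dif_pos hguard, dif_pos hguard]
      rw [PySem.List.slice_from_one, ← List.drop_one]
      exact ih (d.drop 1) (dep + 1) (by simp; omega) hpre'
    · have hle := cp_le sp d
      have hsp : sp ≠ [] := by
        intro h
        apply hc
        rw [hcdef, h]
        simp [alt_common_prefix_len]
      have hcsp : c ≤ sp.length := by omega
      have htake_ne : sp.take c ≠ [] := by
        intro h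
        have hlen0 : min c sp.length = 0 := by simpa using congrArg List.length h
        omega
      rw [if_pos (show ¬(sp.take c, sp.drop c, d.drop c).1 = [] from htake_ne), if_pos hc]
      have hhead : PySem.List.pyGetD (sp.take c) (-1) "" = sp.getD (c - 1) "" := by
        rw [PySem.List.pyGetD_neg_one _ _ htake_ne]
        have hlt : (sp.take c).length = c := by simp; omega
        rw [List.getLast_eq_getElem]
        have h1 : c - 1 < sp.length := by omega
        rw [List.getD_eq_getElem sp "" h1]
        simp only [hlt]
        exact List.getElem_take ..
      rw [hhead]
  · have hA : py_find_sublist d sp = some ((k : Nat) : Int) := by rw [hfind, hB]; rfl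
    simp only [hA]

lemma main_eq : ∀ (N : Nat) (d sp : List String) (dep : Int), d.length ≤ N →
    Pre_find_track_directory_from_searchpath_py d sp dep →
    find_track_directory_from_searchpath_py d sp dep =
      find_track_directory_from_searchpath_py_alt d sp dep := by
  intro N
  induction N with
  | zero =>
    intro d sp dep h hp
    exact main_step d sp dep (fun d' dep' hlt _ => absurd hlt (by omega)) hp
  | succ N ih =>
    intro d sp dep h hp
    exact main_step d sp dep (fun d' dep' hlt hp' => ih d' sp dep' (by omega) hp') hp

-- ===== VERDICT (by name: the statement is the Claim_ definition above) =====
theorem find_track_directory_from_searchpath_py_spec : Claim_equal_find_track_directory_from_searchpath_py := by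
  intro d sp dep _ hpre
  unfold Spec_find_track_directory_from_searchpath_py
  exact main_eq d.length d sp dep le_rfl hpre
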